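-- pv_equiv track=rewrite | github.com/nupurgorkar/310_Music_Art_Mashup | app.py | playlist
-- ===== SOURCE A (Python) =====
-- def playlist(hue_to_tracks):
--     play_list = []
--     added_tracks = set()  # Keeps track of unique tracks
--
--     # Add the first track from each hue if it hasn't been added yet
--     for hue, tracks in hue_to_tracks.items():
--         for track in tracks:
--             if track not in added_tracks:
--                 play_list.append(track)
--                 added_tracks.add(track)
--                 if len(play_list) >= 7:
--                     return play_list
--
--     return play_list
-- ===== SOURCE B (Python) =====
-- def playlist(hue_to_tracks):
--     remaining = [t for tracks in hue_to_tracks.values() for t in tracks]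
--     out = []
--     while remaining and len(out) < 7:
--         head = remaining[0]
--         out.append(head)
--         remaining = [x for x in remaining if x != head]
--     return out
-- ===== Notes on version B (the rewrite author's own statement) =====
-- stated objective: alternative
-- what changed: Replaces A's single pass with a membership set, per-track append and early-exit return by selection-by-filtering: flatten once, then repeatedly (at most 7 times) take the head of the remaining list and filter out all of its occurrences; no seen-set or dedup container is maintained at all.
import Mathlib
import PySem

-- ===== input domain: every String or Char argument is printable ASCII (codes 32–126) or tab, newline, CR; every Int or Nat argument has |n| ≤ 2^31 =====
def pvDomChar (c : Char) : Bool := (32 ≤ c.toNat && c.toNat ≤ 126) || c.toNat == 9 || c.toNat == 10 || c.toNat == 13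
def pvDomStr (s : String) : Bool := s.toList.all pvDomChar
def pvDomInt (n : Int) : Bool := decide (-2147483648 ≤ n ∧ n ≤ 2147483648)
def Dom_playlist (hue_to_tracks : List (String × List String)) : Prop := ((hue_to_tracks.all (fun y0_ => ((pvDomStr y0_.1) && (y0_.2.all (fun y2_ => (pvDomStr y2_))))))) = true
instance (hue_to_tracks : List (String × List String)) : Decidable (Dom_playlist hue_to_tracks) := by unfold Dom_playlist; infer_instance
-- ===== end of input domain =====

-- B replaces A's seen-set + per-track append + early-exit pass by selection-by-filtering:
-- flatten once, then repeatedly (≤ 7 times) take the head and filter out its occurrences; objective: alternative.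

-- ===== PORT A =====
-- inner 'for track in tracks' loop; .inr r models the early 'return play_list'
def playlistInner : List String → List String → PySem.Set String →
    (List String × PySem.Set String) ⊕ List String
  | [], pl, seen => .inl (pl, seen)
  | t :: ts, pl, seen =>
    if PySem.Set.contains seen t then playlistInner ts pl seen
    else
      let pl' := pl ++ [t]
      if pl'.length ≥ 7 then .inr pl'
      else playlistInner ts pl' (PySem.Set.add seen t)

-- outer 'for hue, tracks in hue_to_tracks.items()' loop
def playlistOuter : List (String × List String) → List String → PySem.Set String → List String
  | [], pl, _ => pl
  | (_, ts) :: rest, pl, seen =>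
    match playlistInner ts pl seen with
    | .inl (pl', seen') => playlistOuter rest pl' seen'
    | .inr r => r

def playlist (hue_to_tracks : List (String × List String)) : List String :=
  playlistOuter hue_to_tracks [] PySem.Set.empty

-- ===== PORT B =====
-- the 'while remaining and len(out) < 7' loop: take the head, filter out its occurrences
def playlistBLoop : List String → List String → List String
  | [], out => out
  | h :: t, out =>
    if 7 ≤ out.length then out
    else playlistBLoop ((h :: t).filter (fun x => x != h)) (out ++ [h])
termination_by r _ => r.length
decreasing_by
  simp only [List.filter_cons, bne_self_eq_false, Bool.false_eq_true, if_false, List.length_cons]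
  exact Nat.lt_succ_of_le (le_trans (List.length_filter_le _ _) (by simp))

def playlist_alt (hue_to_tracks : List (String × List String)) : List String :=
  playlistBLoop ((hue_to_tracks.map Prod.snd).flatten) []

-- ===== PRECONDITION & SPEC =====
def Spec_playlist (hue_to_tracks : List (String × List String)) (out : List String) : Prop := out = playlist_alt hue_to_tracks
instance (hue_to_tracks : List (String × List String)) (out : List String) : Decidable (Spec_playlist hue_to_tracks out) := by unfold Spec_playlist; infer_instance

-- ===== CLAIM (what is proved, stated in full; the proofs are below) =====
def Claim_equal_playlist : Prop := ∀ (hue_to_tracks : List (String × List String)), Dom_playlist hue_to_tracks → Spec_playlist hue_to_tracks (playlist hue_to_tracks)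

-- ===== LEMMAS AND PROOFS =====

-- A's two nested loops, run over the flattened track list
def run : List String → List String → PySem.Set String → List String
  | [], pl, _ => pl
  | t :: ts, pl, seen =>
    if PySem.Set.contains seen t then run ts pl seen
    else
      let pl' := pl ++ [t]
      if pl'.length ≥ 7 then pl'
      else run ts pl' (PySem.Set.add seen t)

-- ordered dedup of xs relative to an already-seen set
def dd (seen : PySem.Set String) : List String → List String
  | [] => []
  | t :: ts => if PySem.Set.contains seen t then dd seen ts else t :: dd (PySem.Set.add seen t) ts

-- full (unbounded) selection-by-filtering dedup, B's loop without the 7-bound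
def nub : List String → List String
  | [] => []
  | h :: t => h :: nub (t.filter (fun x => x != h))
termination_by r => r.length
decreasing_by
  simp only [List.length_unattach, List.length_cons]
  exact Nat.lt_succ_of_le (le_trans (List.length_filter_le _ _) (by simp))

theorem run_append (ts ys : List String) (pl : List String) (seen : PySem.Set String) :
    run (ts ++ ys) pl seen =
      (match playlistInner ts pl seen with
       | .inl (pl', seen') => run ys pl' seen'
       | .inr r => r) := by
  induction ts generalizing pl seen with
  | nil => rfl
  | cons t ts ih =>
    simp only [List.cons_append, run, playlistInner]
    split_ifs with h1 h2
    · exact ih pl seen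
    · rfl
    · exact ih _ _

theorem outer_eq_run (l : List (String × List String)) (pl : List String) (seen : PySem.Set String) :
    playlistOuter l pl seen = run (l.flatMap Prod.snd) pl seen := by
  induction l generalizing pl seen with
  | nil => rfl
  | cons p rest ih =>
    obtain ⟨h, ts⟩ := p
    simp only [List.flatMap_cons, playlistOuter, run_append]
    cases hI : playlistInner ts pl seen with
    | inl x => obtain ⟨pl', seen'⟩ := x; exact ih pl' seen'
    | inr r => rfl

theorem run_eq_take (xs : List String) (pl : List String) (seen : PySem.Set String)
    (hlen : pl.length < 7) :
    run xs pl seen = (pl ++ dd seen xs).take 7 := by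
  induction xs generalizing pl seen with
  | nil =>
    simp only [dd, run, List.append_nil]
    exact (List.take_of_length_le (by omega)).symm
  | cons t ts ih =>
    simp only [run, dd]
    split_ifs with h1 h2
    · exact ih pl seen hlen
    · -- early return: pl.length = 6
      have h6 : pl.length = 6 := by simp at h2; omega
      rw [List.take_append]
      simp [h6, List.take_of_length_le (by omega : pl.length ≤ 7)]
    · rw [ih (pl ++ [t]) (PySem.Set.add seen t) (by simp at h2 ⊢; omega)]
      simp

-- dd relative to 'seen' is nub of the list with seen elements filtered away
theorem dd_eq_nub : ∀ (n : Nat) (xs : List String) (seen : PySem.Set String), xs.length ≤ n →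
    dd seen xs = nub (xs.filter (fun x => !(PySem.Set.contains seen x))) := by
  intro n
  induction n with
  | zero => intro xs seen h; rw [List.length_eq_zero_iff.mp (Nat.le_zero.mp h)]; simp [dd, nub]
  | succ n ih =>
    intro xs seen h
    cases xs with
    | nil => simp [dd, nub]
    | cons x t =>
      by_cases hc : PySem.Set.contains seen x = true
      · simp only [dd, List.filter_cons, hc, Bool.not_true, Bool.false_eq_true, if_false, if_true]
        exact ih t seen (by simpa using h)
      · have hc' : PySem.Set.contains seen x = false := by simpa using hc
        simp only [dd, List.filter_cons, hc', Bool.not_false, Bool.false_eq_true, if_false, if_true]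
        rw [nub, ih t (PySem.Set.add seen x) (by simpa using h), List.filter_filter]
        congr 2
        apply List.filter_congr
        intro y _
        have hadd : PySem.Set.contains (PySem.Set.add seen x) y
            = (PySem.Set.contains seen y || y == x) := by
          rw [Bool.eq_iff_iff]
          simp [PySem.Set.mem_add]
        rw [hadd]
        cases hy : (y == x) <;> cases hs : PySem.Set.contains seen y <;> simp [bne, hy]

-- B's bounded loop is nub followed by take 7
theorem bLoop_of_full (r out : List String) (h : 7 ≤ out.length) :
    playlistBLoop r out = out := by
  cases r with
  | nil => simp [playlistBLoop]
  | cons a t => rw [playlistBLoop, if_pos h]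

theorem bLoop_eq_nub : ∀ (n : Nat) (r out : List String), r.length ≤ n → out.length < 7 →
    playlistBLoop r out = (out ++ nub r).take 7 := by
  intro n
  induction n with
  | zero =>
    intro r out h hlt
    rw [List.length_eq_zero_iff.mp (Nat.le_zero.mp h)]
    simp only [nub, List.append_nil, playlistBLoop]
    exact (List.take_of_length_le (by omega)).symm
  | succ n ih =>
    intro r out h hlt
    cases r with
    | nil =>
      simp only [nub, List.append_nil, playlistBLoop]
      exact (List.take_of_length_le (by omega)).symm
    | cons a t =>
      rw [playlistBLoop, if_neg (by omega), nub]
      have hfil : (a :: t).filter (fun x => x != a) = t.filter (fun x => x != a) := by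
        simp
      rw [hfil]
      by_cases h7 : (out ++ [a]).length < 7
      · rw [ih (t.filter (fun x => x != a)) (out ++ [a])
            (le_trans (List.length_filter_le _ _) (by simpa using h)) h7]
        simp
      · -- out just reached length 7: both sides are out ++ [a]
        have h7' : (out ++ [a]).length = 7 := by simp at h7 ⊢; omega
        rw [bLoop_of_full _ _ (by omega)]
        rw [show (a :: nub (t.filter (fun x => x != a)))
              = [a] ++ nub (t.filter (fun x => x != a)) from rfl,
            ← List.append_assoc, ← h7', List.take_left]

-- ===== VERDICT (by name: the statement is the Claim_ definition above) =====
theorem playlist_spec : Claim_equal_playlist := by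
  intro l _
  show playlist l = playlist_alt l
  have hflat : (l.map Prod.snd).flatten = l.flatMap Prod.snd := List.flatMap_def.symm
  rw [playlist, playlist_alt, outer_eq_run, run_eq_take _ _ _ (by simp), hflat,
    bLoop_eq_nub (l.flatMap Prod.snd).length _ _ le_rfl (by simp),
    dd_eq_nub (l.flatMap Prod.snd).length _ _ le_rfl]
  simp [List.filter_true, PySem.Set.empty]
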